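-- pv_equiv track=rewrite | github.com/JakKepka/FuzzyClusteringAlgorithms | libraries/.ipynb_checkpoints/process_data-checkpoint.py | map_strings_to_ints
-- ===== SOURCE A (Python) =====
-- def map_strings_to_ints(strings):
--     # Utwórz słownik do mapowania stringów na inty
--     string_to_int = {}
--     current_int = 0
--
--     # Wynikowa lista z intami
--     result = []
--
--     # Przejdź przez listę stringów
--     for string in strings:
--         # Jeśli string nie jest jeszcze w słowniku, dodaj go
--         if string not in string_to_int:
--             string_to_int[string] = current_int
--             current_int += 1
--         # Dodaj odpowiadający int do wynikowej listy
--         result.append(string_to_int[string])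
--
--     return result
-- ===== SOURCE B (Python) =====
-- def map_strings_to_ints(strings):
--     # No mapping table at all: the id of s is the number of distinct strings
--     # strictly before the first occurrence of s.
--     return [len(set(strings[:strings.index(s)])) for s in strings]
-- ===== Notes on version B (the rewrite author's own statement) =====
-- stated objective: alternative
-- what changed: Removes A's incrementally-built mapping dict and counter entirely: B computes each id directly as len(set(strings[:strings.index(s)])), the number of distinct strings before the first occurrence of s, in a single comprehension (trading A's O(n) dict for a dict-free O(n^2) direct computation).
import Mathlib
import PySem

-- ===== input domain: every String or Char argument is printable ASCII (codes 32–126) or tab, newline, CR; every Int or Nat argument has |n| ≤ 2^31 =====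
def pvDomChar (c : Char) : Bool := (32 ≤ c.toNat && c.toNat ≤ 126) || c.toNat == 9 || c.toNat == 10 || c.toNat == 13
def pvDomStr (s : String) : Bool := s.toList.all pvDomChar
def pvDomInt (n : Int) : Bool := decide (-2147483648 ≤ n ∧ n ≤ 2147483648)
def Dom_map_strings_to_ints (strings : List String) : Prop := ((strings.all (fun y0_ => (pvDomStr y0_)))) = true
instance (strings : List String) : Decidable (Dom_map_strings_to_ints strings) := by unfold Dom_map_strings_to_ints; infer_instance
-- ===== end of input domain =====

-- B drops A's mapping dict entirely: the id of s is computed directly as the number of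
-- distinct strings before s's first occurrence; alternative decomposition, not faster.

-- ===== PORT A =====
-- A's loop body: the dict and the counter grow as new strings are discovered, the id is emitted in the same pass.
def mapStepA (st : PySem.Dict String Int × Int × List Int) (s : String) :
    PySem.Dict String Int × Int × List Int :=
  let d := st.1
  let c := st.2.1
  let res := st.2.2
  -- if string not in string_to_int: string_to_int[string] = current_int; current_int += 1
  let dc := if d.contains s then (d, c) else (d.insert s c, c + 1)
  -- result.append(string_to_int[string])  -- the key is always present here, so getD is exact
  (dc.1, dc.2, res ++ [dc.1.getD s 0])

def map_strings_to_ints (strings : List String) : List Int :=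
  (strings.foldl mapStepA (PySem.Dict.empty, 0, [])).2.2

-- ===== PORT B =====
-- [len(set(strings[:strings.index(s)])) for s in strings]
def map_strings_to_ints_alt (strings : List String) : List Int :=
  strings.map (fun s =>
    match PySem.List.index? strings s with
    | some i => ((PySem.Set.ofList (PySem.List.slice strings none (some (i : Int)))).length : Int)
    | none => 0)  -- unreachable: each s is drawn from strings, so .index never raises

-- ===== PRECONDITION & SPEC =====
def Spec_map_strings_to_ints (strings : List String) (out : List Int) : Prop := out = map_strings_to_ints_alt strings
instance (strings : List String) (out : List Int) : Decidable (Spec_map_strings_to_ints strings out) := by unfold Spec_map_strings_to_ints; infer_instance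

-- ===== CLAIM (what is proved, stated in full; the proofs are below) =====
def Claim_equal_map_strings_to_ints : Prop := ∀ (strings : List String), Dom_map_strings_to_ints strings → Spec_map_strings_to_ints strings (map_strings_to_ints strings)

-- ===== LEMMAS AND PROOFS =====

-- The id table of a unique list u with starting id s: {u[i] ↦ s + i}
def idmapFrom (u : List String) (s : Int) : PySem.Dict String Int :=
  PySem.Dict.mk ((PySem.List.enumerate u s).map (fun p => (p.2, p.1)))

theorem contains_idmapFrom (u : List String) (s : Int) (x : String) :
    (idmapFrom u s).contains x = decide (x ∈ u) := by
  rw [PySem.Dict.contains_eq_decide_mem_keys]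
  congr 1
  simp only [idmapFrom, PySem.Dict.keys, List.map_map]
  simp [Function.comp_def]

theorem get?_idmapFrom_of_mem (u : List String) (s : Int) (x : String) (hx : x ∈ u) :
    (idmapFrom u s).get? x = some (s + (u.idxOf x : Int)) := by
  induction u generalizing s with
  | nil => simp at hx
  | cons a u ih =>
    rw [List.mem_cons] at hx
    simp only [idmapFrom, PySem.List.enumerate_cons, List.map_cons, PySem.Dict.get?_mk_cons]
    by_cases h : a = x
    · subst h; simp [List.idxOf_cons_self]
    · have hx' : x ∈ u := hx.resolve_left (fun h' => h h'.symm)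
      have hrec := ih (s + 1) hx'
      simp only [idmapFrom] at hrec
      simp only [beq_iff_eq, if_neg h, hrec]
      have hco : (a :: u).idxOf x = u.idxOf x + 1 := by
        simp [h]
      rw [hco]; congr 1; push_cast; ring

theorem idmapFrom_append_singleton (u : List String) (s : Int) (x : String) (hx : x ∉ u) :
    idmapFrom (u ++ [x]) s = (idmapFrom u s).insert x (s + (u.length : Int)) := by
  apply PySem.Dict.ext
  rw [PySem.Dict.items_insert_of_not_contains]
  · simp [idmapFrom, PySem.List.enumerate_append, PySem.List.enumerate_cons, PySem.List.enumerate_nil]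
  · rw [contains_idmapFrom]; simpa using hx

theorem idxOf_append_left (t r : List String) (x : String) (h : x ∈ t) :
    (t ++ r).idxOf x = t.idxOf x := by
  induction t with
  | nil => simp at h
  | cons a t ih =>
    by_cases hax : a = x
    · subst hax; simp [List.idxOf_cons_self]
    · rw [List.mem_cons] at h
      have h' : x ∈ t := h.resolve_left (fun h'' => hax h''.symm)
      simp [hax, ih h']

theorem idxOf_append_self (u : List String) (x : String) (hx : x ∉ u) :
    (u ++ [x]).idxOf x = u.length := by
  induction u with
  | nil => simp [List.idxOf_cons_self]
  | cons a u ih =>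
    simp only [List.mem_cons, not_or] at hx
    have hax : (a == x) = false := by
      simp only [beq_eq_false_iff_ne]; exact fun h => hx.1 h.symm
    simp [List.idxOf_cons, hax, ih hx.2]

theorem ofList_append_prefix (t l : List String) :
    ∃ r, PySem.Set.ofList (t ++ l) = PySem.Set.ofList t ++ r := by
  rw [PySem.Set.ofList_append, PySem.Set.update_eq_append_filter]
  exact ⟨_, rfl⟩

theorem idxOf_ofList_append (t l : List String) (x : String) (hx : x ∈ PySem.Set.ofList t) :
    (PySem.Set.ofList (t ++ l)).idxOf x = (PySem.Set.ofList t).idxOf x := by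
  obtain ⟨r, hr⟩ := ofList_append_prefix t l
  rw [hr, idxOf_append_left _ _ _ hx]

-- The loop invariant for A: the dict is the id table of the distinct strings seen so far,
-- the counter is their number, and each emitted id is the final first-occurrence index.
theorem loopA (l : List String) : ∀ (seen : List String) (res : List Int),
    l.foldl mapStepA
      (idmapFrom (PySem.Set.ofList seen) 0, ((PySem.Set.ofList seen).length : Int), res)
    = (idmapFrom (PySem.Set.ofList (seen ++ l)) 0, ((PySem.Set.ofList (seen ++ l)).length : Int),
       res ++ l.map (fun s => ((PySem.Set.ofList (seen ++ l)).idxOf s : Int))) := by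
  induction l with
  | nil => intro seen res; simp
  | cons x l ih =>
    intro seen res
    rw [List.foldl_cons]
    by_cases hx : x ∈ PySem.Set.ofList seen
    · have hc : (idmapFrom (PySem.Set.ofList seen) 0).contains x = true := by
        rw [contains_idmapFrom]; simpa using hx
      have hseen : PySem.Set.ofList (seen ++ [x]) = PySem.Set.ofList seen := by
        rw [PySem.Set.ofList_append_singleton, PySem.Set.add_of_mem hx]
      have hget : (idmapFrom (PySem.Set.ofList seen) 0).getD x 0
          = ((PySem.Set.ofList seen).idxOf x : Int) := by
        rw [PySem.Dict.getD_eq_get?_getD, get?_idmapFrom_of_mem _ _ _ hx]; simp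
      have hstep : mapStepA (idmapFrom (PySem.Set.ofList seen) 0, ((PySem.Set.ofList seen).length : Int), res) x
          = (idmapFrom (PySem.Set.ofList seen) 0, ((PySem.Set.ofList seen).length : Int),
             res ++ [((PySem.Set.ofList seen).idxOf x : Int)]) := by
        simp only [mapStepA, hc, if_true, hget]
      rw [hstep]
      have hih := ih (seen ++ [x]) (res ++ [((PySem.Set.ofList seen).idxOf x : Int)])
      rw [hseen] at hih
      rw [hih]
      have hassoc : seen ++ [x] ++ l = seen ++ x :: l := by simp
      rw [hassoc]
      have hidx : ((PySem.Set.ofList (seen ++ x :: l)).idxOf x : Int)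
          = ((PySem.Set.ofList seen).idxOf x : Int) := by
        have h1 : seen ++ x :: l = (seen ++ [x]) ++ l := by simp
        rw [h1, idxOf_ofList_append, hseen]
        rw [hseen]; exact hx
      simp [hidx]
    · have hc : (idmapFrom (PySem.Set.ofList seen) 0).contains x = false := by
        rw [contains_idmapFrom]; simpa using hx
      have hseen : PySem.Set.ofList (seen ++ [x]) = PySem.Set.ofList seen ++ [x] := by
        rw [PySem.Set.ofList_append_singleton, PySem.Set.add_of_not_mem hx]
      have hins : idmapFrom (PySem.Set.ofList (seen ++ [x])) 0
          = (idmapFrom (PySem.Set.ofList seen) 0).insert x ((PySem.Set.ofList seen).length : Int) := by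
        rw [hseen, idmapFrom_append_singleton _ _ _ hx]; ring_nf
      have hstep : mapStepA (idmapFrom (PySem.Set.ofList seen) 0, ((PySem.Set.ofList seen).length : Int), res) x
          = ((idmapFrom (PySem.Set.ofList seen) 0).insert x ((PySem.Set.ofList seen).length : Int),
             ((PySem.Set.ofList seen).length : Int) + 1,
             res ++ [((PySem.Set.ofList seen).length : Int)]) := by
        simp only [mapStepA, hc, Bool.false_eq_true, if_false]
        rw [PySem.Dict.getD_insert_self]
      rw [hstep]
      have hlen1 : ((PySem.Set.ofList (seen ++ [x])).length : Int)
          = ((PySem.Set.ofList seen).length : Int) + 1 := by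
        rw [hseen]; push_cast [List.length_append, List.length_singleton]; ring
      have hih := ih (seen ++ [x]) (res ++ [((PySem.Set.ofList seen).length : Int)])
      rw [hins, hlen1] at hih
      rw [hih]
      have hassoc : seen ++ [x] ++ l = seen ++ x :: l := by simp
      rw [hassoc]
      have hidx : ((PySem.Set.ofList (seen ++ x :: l)).idxOf x : Int)
          = ((PySem.Set.ofList seen).length : Int) := by
        have h1 : seen ++ x :: l = (seen ++ [x]) ++ l := by simp
        rw [h1, idxOf_ofList_append, hseen, idxOf_append_self _ _ hx]
        rw [hseen]; simp
      simp [hidx]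

-- Both ports compute the first-occurrence index of each string.
theorem portA_eq (strings : List String) :
    map_strings_to_ints strings
      = strings.map (fun s => ((PySem.Set.ofList strings).idxOf s : Int)) := by
  unfold map_strings_to_ints
  have h0 : (PySem.Dict.empty : PySem.Dict String Int) = idmapFrom (PySem.Set.ofList []) 0 := rfl
  rw [h0]
  have hl := loopA strings [] []
  simp only [PySem.Set.ofList_nil, List.length_nil, Nat.cast_zero, List.nil_append] at hl ⊢
  rw [hl]

-- The number of distinct strings before the first occurrence of s IS its first-occurrence id.
theorem distinct_prefix_len (l : List String) (s : String) (k : Nat)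
    (hk : PySem.List.index? l s = some k) :
    (PySem.Set.ofList (l.take k)).length = (PySem.Set.ofList l).idxOf s := by
  obtain ⟨pre, suf, hl, hlen, hpre⟩ := (PySem.List.index?_eq_some_iff l s k).mp hk
  subst hl
  have htake : (pre ++ s :: suf).take k = pre := by
    rw [← hlen, List.take_left]
  rw [htake]
  have h1 : pre ++ s :: suf = (pre ++ [s]) ++ suf := by simp
  have hps : PySem.Set.ofList (pre ++ [s]) = PySem.Set.ofList pre ++ [s] := by
    rw [PySem.Set.ofList_append_singleton, PySem.Set.add_of_not_mem (by simpa using hpre)]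
  rw [h1, idxOf_ofList_append, hps, idxOf_append_self]
  · simpa using hpre
  · rw [hps]; simp

theorem portB_eq (strings : List String) :
    map_strings_to_ints_alt strings
      = strings.map (fun s => ((PySem.Set.ofList strings).idxOf s : Int)) := by
  unfold map_strings_to_ints_alt
  apply List.map_congr_left
  intro s hs
  obtain ⟨k, hk⟩ := Option.isSome_iff_exists.mp ((PySem.List.index?_isSome_iff strings s).mpr hs)
  rw [hk]
  show ((PySem.Set.ofList (PySem.List.slice strings none (some (k : Int)))).length : Int) = _
  rw [PySem.List.slice_to_natCast, distinct_prefix_len strings s k hk]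

-- ===== VERDICT (by name: the statement is the Claim_ definition above) =====
theorem map_strings_to_ints_spec : Claim_equal_map_strings_to_ints := by
  intro strings _
  unfold Spec_map_strings_to_ints
  rw [portA_eq, portB_eq]
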